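-- pv_equiv track=rewrite | github.com/CCANT9944/gp_data | ui/csv_preview/dialog.py | _guess_import_mapping
-- ===== SOURCE A (Python) =====
-- from typing import Callable, Sequence
--
-- def _normalized_mapping_text(value: str | None) -> str:
--     if not value:
--         return ""
--     return " ".join(str(value).replace("_", " ").strip().lower().split())
--
-- def _header_contains_any(normalized_header: str, tokens: Sequence[str]) -> bool:
--     return any(token in normalized_header for token in tokens)
--
-- def _import_header_hints(field_name: str) -> tuple[str, ...]:
--     if field_name == "field1":
--         return ("type", "class", "class name", "classname", "category")
--     if field_name == "field2":
--         return ("name", "description", "item", "product")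
--     if field_name == "field3":
--         return ("cost", "buy", "purchase", "total")
--     if field_name == "field4":
--         return ("note", "notes", "supplier", "brand", "size")
--     if field_name == "field5":
--         return ("unit", "units", "qty", "quantity", "volume", "ml")
--     if field_name == "field7":
--         return ("selling price", "menu price", "sell price", "price", "revenue", "amount", "sales")
--     return ()
--
-- def _import_header_match_score(field_name: str, label: str, header: str) -> int:
--     normalized_header = _normalized_mapping_text(header)
--     normalized_label = _normalized_mapping_text(label)
--     if not normalized_header:
--         return -1
--
--     header_looks_like_buy_price = _header_contains_any(normalized_header, ("cost", "buy", "purchase", "wholesale"))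
--     header_looks_like_sell_price = _header_contains_any(normalized_header, ("selling", "menu", "sell", "revenue", "sales"))
--     header_has_generic_price = "price" in normalized_header
--
--     score = 0
--     if normalized_label and normalized_header == normalized_label:
--         score += 100
--     elif normalized_label and normalized_label in normalized_header:
--         score += 35
--
--     for hint in _import_header_hints(field_name):
--         if normalized_header == hint:
--             score += 80
--         elif hint in normalized_header:
--             score += 30
--
--     if field_name == "field7" and "cost" in normalized_header and "price" not in normalized_header:
--         score -= 20
--     if field_name == "field3" and header_looks_like_sell_price:
--         score -= 80
--     if field_name == "field3" and header_has_generic_price and not header_looks_like_buy_price: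
--         score -= 45
--     if field_name == "field7" and header_looks_like_buy_price and not header_looks_like_sell_price:
--         score -= 60
--     return score
--
-- def _guess_import_mapping(headers: Sequence[str], field_labels: Sequence[str]) -> dict[str, int | None]:
--     guessed_mapping: dict[str, int | None] = {"field6": None}
--     used_indices: set[int] = set()
--     for offset, field_name in enumerate(("field1", "field2", "field3", "field4", "field5", "field7")):
--         label_index = int(field_name[5:]) - 1
--         label = field_labels[label_index] if 0 <= label_index < len(field_labels) else field_name
--         best_index: int | None = None
--         best_score = 0
--         for index, header in enumerate(headers):
--             if index in used_indices:
--                 continue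
--             score = _import_header_match_score(field_name, label, header)
--             if score > best_score:
--                 best_score = score
--                 best_index = index
--         guessed_mapping[field_name] = best_index
--         if best_index is not None:
--             used_indices.add(best_index)
--     return guessed_mapping
-- ===== SOURCE B (Python) =====
-- from typing import Callable, Sequence
--
-- def _normalized_mapping_text(value):
--     if not value:
--         return ""
--     return " ".join(str(value).replace("_", " ").strip().lower().split())
--
-- def _header_contains_any(normalized_header, tokens):
--     return any(token in normalized_header for token in tokens)
--
-- def _import_header_hints(field_name):
--     if field_name == "field1":
--         return ("type", "class", "class name", "classname", "category")
--     if field_name == "field2":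
--         return ("name", "description", "item", "product")
--     if field_name == "field3":
--         return ("cost", "buy", "purchase", "total")
--     if field_name == "field4":
--         return ("note", "notes", "supplier", "brand", "size")
--     if field_name == "field5":
--         return ("unit", "units", "qty", "quantity", "volume", "ml")
--     if field_name == "field7":
--         return ("selling price", "menu price", "sell price", "price", "revenue", "amount", "sales")
--     return ()
--
-- def _import_header_match_score(field_name, label, header):
--     normalized_header = _normalized_mapping_text(header)
--     normalized_label = _normalized_mapping_text(label)
--     if not normalized_header:
--         return -1
--
--     header_looks_like_buy_price = _header_contains_any(normalized_header, ("cost", "buy", "purchase", "wholesale"))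
--     header_looks_like_sell_price = _header_contains_any(normalized_header, ("selling", "menu", "sell", "revenue", "sales"))
--     header_has_generic_price = "price" in normalized_header
--
--     score = 0
--     if normalized_label and normalized_header == normalized_label:
--         score += 100
--     elif normalized_label and normalized_label in normalized_header:
--         score += 35
--
--     for hint in _import_header_hints(field_name):
--         if normalized_header == hint:
--             score += 80
--         elif hint in normalized_header:
--             score += 30
--
--     if field_name == "field7" and "cost" in normalized_header and "price" not in normalized_header:
--         score -= 20
--     if field_name == "field3" and header_looks_like_sell_price:
--         score -= 80
--     if field_name == "field3" and header_has_generic_price and not header_looks_like_buy_price: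
--         score -= 45
--     if field_name == "field7" and header_looks_like_buy_price and not header_looks_like_sell_price:
--         score -= 60
--     return score
--
-- def _guess_import_mapping(headers, field_labels):
--     # Recursive assignment: for each field, list the still-free (index, score)
--     # candidates, keep the positive ones, and take the first maximum (Python's
--     # max is earliest-wins on ties, matching A's strict '>' running best).
--     def _label_for(field_name):
--         k = int(field_name[5:]) - 1
--         return field_labels[k] if 0 <= k < len(field_labels) else field_name
--
--     def _assign(fields, used):
--         if not fields:
--             return []
--         field_name = fields[0]
--         label = _label_for(field_name)
--         candidates = [(i, _import_header_match_score(field_name, label, h))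
--                       for i, h in enumerate(headers) if i not in used]
--         positive = [c for c in candidates if c[1] > 0]
--         best = max(positive, key=lambda c: c[1], default=None)
--         if best is None:
--             return [(field_name, None)] + _assign(fields[1:], used)
--         return [(field_name, best[0])] + _assign(fields[1:], used | {best[0]})
--
--     pairs = _assign(["field1", "field2", "field3", "field4", "field5", "field7"], set())
--     return {"field6": None, **dict(pairs)}
-- ===== Notes on version B (the rewrite author's own statement) =====
-- stated objective: alternative
-- what changed: B replaces A's single interleaved fold that mutates a dict and a running (best_index, best_score) pair by a recursive assignment pass that, per field, filters the still-free positive-score (index, score) candidates and picks their first maximum with max(..., key=..., default=None), building the result pairs list recursively and merging it into {'field6': None} at the end.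
import Mathlib
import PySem

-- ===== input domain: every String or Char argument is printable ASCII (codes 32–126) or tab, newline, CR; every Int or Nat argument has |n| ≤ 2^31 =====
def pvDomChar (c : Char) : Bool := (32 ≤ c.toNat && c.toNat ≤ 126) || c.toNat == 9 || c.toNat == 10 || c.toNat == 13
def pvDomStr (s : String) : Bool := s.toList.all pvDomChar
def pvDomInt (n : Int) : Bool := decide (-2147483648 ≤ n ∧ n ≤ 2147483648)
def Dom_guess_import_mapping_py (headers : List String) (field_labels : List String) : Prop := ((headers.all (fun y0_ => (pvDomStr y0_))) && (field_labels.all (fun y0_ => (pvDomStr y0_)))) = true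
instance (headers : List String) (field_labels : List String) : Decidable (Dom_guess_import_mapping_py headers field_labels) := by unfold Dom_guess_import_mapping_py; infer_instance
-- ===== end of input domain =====

-- B replaces A's interleaved running-best fold over a dict/set state by a recursive
-- assignment pass that filters the free positive-score candidates per field and takes
-- their first maximum; same return value, objective: alternative decomposition.

-- ===== PORT A =====
-- shared module helpers (identical Python code in Source A and Source B)

def normalized_mapping_text (value : String) : String :=
  if value = "" then ""
  else PySem.Str.join " " (PySem.Str.split₀ (PySem.Str.lower (PySem.Str.strip (PySem.Str.replace value "_" " "))))

def header_contains_any (normalized_header : String) (tokens : List String) : Bool :=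
  tokens.any (fun token => PySem.Str.isIn token normalized_header)

def import_header_hints (field_name : String) : List String :=
  if field_name = "field1" then ["type", "class", "class name", "classname", "category"]
  else if field_name = "field2" then ["name", "description", "item", "product"]
  else if field_name = "field3" then ["cost", "buy", "purchase", "total"]
  else if field_name = "field4" then ["note", "notes", "supplier", "brand", "size"]
  else if field_name = "field5" then ["unit", "units", "qty", "quantity", "volume", "ml"]
  else if field_name = "field7" then ["selling price", "menu price", "sell price", "price", "revenue", "amount", "sales"]
  else []

def import_header_match_score (field_name : String) (label : String) (header : String) : Int :=
  let normalized_header := normalized_mapping_text header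
  let normalized_label := normalized_mapping_text label
  if normalized_header = "" then -1
  else
    let header_looks_like_buy_price := header_contains_any normalized_header ["cost", "buy", "purchase", "wholesale"]
    let header_looks_like_sell_price := header_contains_any normalized_header ["selling", "menu", "sell", "revenue", "sales"]
    let header_has_generic_price := PySem.Str.isIn "price" normalized_header
    let score : Int := 0
    let score := if normalized_label ≠ "" ∧ normalized_header = normalized_label then score + 100
      else if normalized_label ≠ "" ∧ PySem.Str.isIn normalized_label normalized_header then score + 35
      else score
    let score := (import_header_hints field_name).foldl
      (fun score hint =>
        if normalized_header = hint then score + 80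
        else if PySem.Str.isIn hint normalized_header then score + 30
        else score) score
    let score := if field_name = "field7" ∧ PySem.Str.isIn "cost" normalized_header ∧ ¬ PySem.Str.isIn "price" normalized_header then score - 20 else score
    let score := if field_name = "field3" ∧ header_looks_like_sell_price then score - 80 else score
    let score := if field_name = "field3" ∧ header_has_generic_price ∧ ¬ header_looks_like_buy_price then score - 45 else score
    let score := if field_name = "field7" ∧ header_looks_like_buy_price ∧ ¬ header_looks_like_sell_price then score - 60 else score
    score

def guess_import_mapping_py (headers : List String) (field_labels : List String) : List (String × Option Int) :=
  let final := (["field1", "field2", "field3", "field4", "field5", "field7"]).foldl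
    (fun (st : PySem.Dict String (Option Int) × PySem.Set Int) field_name =>
      -- int(field_name[5:]) - 1; the field names are the six literals, so int() never raises: getD 0 is unreachable
      let label_index : Int := (PySem.Int.ofChars? (PySem.List.slice field_name.toList (some 5) none)).getD 0 - 1
      let label := if 0 ≤ label_index ∧ label_index < field_labels.length then PySem.List.pyGetD field_labels label_index field_name else field_name
      let best := (PySem.List.enumerate headers 0).foldl
        (fun (b : Option Int × Int) p =>
          if PySem.Set.contains st.2 p.1 then b
          else
            let score := import_header_match_score field_name label p.2
            if b.2 < score then (some p.1, score) else b)
        (none, 0)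
      (PySem.Dict.insert st.1 field_name best.1,
       match best.1 with
       | some i => PySem.Set.add st.2 i
       | none => st.2))
    (PySem.Dict.insert PySem.Dict.empty "field6" none, PySem.Set.empty)
  final.1.items

-- ===== PORT B =====
-- _label_for(field_name) in Source B (closure over field_labels)
def label_for (field_labels : List String) (field_name : String) : String :=
  -- int(field_name[5:]) - 1; the field names are the six literals, so int() never raises: getD 0 is unreachable
  let k : Int := (PySem.Int.ofChars? (PySem.List.slice field_name.toList (some 5) none)).getD 0 - 1
  if 0 ≤ k ∧ k < field_labels.length then PySem.List.pyGetD field_labels k field_name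
  else field_name

-- _assign(fields, used): recursive, returns the (field, chosen-or-None) pairs
def assign_fields (headers : List String) (field_labels : List String) :
    List String → PySem.Set Int → List (String × Option Int)
  | [], _ => []
  | field_name :: rest, used =>
    let label := label_for field_labels field_name
    let candidates := ((PySem.List.enumerate headers 0).filter
        (fun p => !(PySem.Set.contains used p.1))).map
        (fun p => (p.1, import_header_match_score field_name label p.2))
    let positive := candidates.filter (fun c => decide (0 < c.2))
    match PySem.List.max? positive (fun c => c.2) with
    | none => (field_name, none) :: assign_fields headers field_labels rest used
    | some best => (field_name, some best.1) ::
        assign_fields headers field_labels rest (PySem.Set.union used [best.1])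

def guess_import_mapping_py_alt (headers : List String) (field_labels : List String) : List (String × Option Int) :=
  let pairs := assign_fields headers field_labels
      ["field1", "field2", "field3", "field4", "field5", "field7"] PySem.Set.empty
  -- {"field6": None, **dict(pairs)}
  (PySem.Dict.update (PySem.Dict.insert PySem.Dict.empty "field6" none) pairs).items

-- ===== PRECONDITION & SPEC =====
def Spec_guess_import_mapping_py (headers : List String) (field_labels : List String) (out : List (String × Option Int)) : Prop := out = guess_import_mapping_py_alt headers field_labels
instance (headers : List String) (field_labels : List String) (out : List (String × Option Int)) : Decidable (Spec_guess_import_mapping_py headers field_labels out) := by unfold Spec_guess_import_mapping_py; infer_instance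

-- ===== CLAIM (what is proved, stated in full; the proofs are below) =====
def Claim_equal_guess_import_mapping_py : Prop := ∀ (headers : List String) (field_labels : List String), Dom_guess_import_mapping_py headers field_labels → Spec_guess_import_mapping_py headers field_labels (guess_import_mapping_py headers field_labels)

-- ===== LEMMAS AND PROOFS =====

-- Simulation of A's running-best scan by max?'s first-maximum scan:
-- A's accumulator (best_index, best_score) with threshold 0 is coupled to the
-- Option accumulator of max? over the positive candidates.
theorem inner_sim (g : String → Int) (used : PySem.Set Int) :
    ∀ (l : List (Int × String)) (b : Option Int × Int) (a : Option (Int × Int)),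
    ((b.1 = none ∧ b.2 = 0 ∧ a = none) ∨ (∃ i, b.1 = some i ∧ 0 < b.2 ∧ a = some (i, b.2))) →
    (let FA := l.foldl (fun (b : Option Int × Int) p =>
        if PySem.Set.contains used p.1 then b
        else
          let s := g p.2
          if b.2 < s then (some p.1, s) else b) b
     let FB := l.foldl (fun (a : Option (Int × Int)) p =>
        if !(PySem.Set.contains used p.1) then
          (if 0 < g p.2 then
            (match a with
             | none => some (p.1, g p.2)
             | some m => if m.2 < g p.2 then some (p.1, g p.2) else some m)
           else a)
        else a) a
     ((FA.1 = none ∧ FA.2 = 0 ∧ FB = none) ∨ (∃ i, FA.1 = some i ∧ 0 < FA.2 ∧ FB = some (i, FA.2)))) := by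
  intro l
  induction l with
  | nil => intro b a h; exact h
  | cons p l ih =>
    intro b a h
    obtain ⟨b1, b2⟩ := b
    simp only [List.foldl_cons]
    apply ih
    by_cases hc : PySem.Set.contains used p.1 = true
    · simp only [hc, if_true, Bool.not_true, Bool.false_eq_true, if_false]
      exact h
    · simp only [hc, Bool.not_eq_true'] at *
      simp only [if_true]
      rcases h with ⟨h1, h2, h3⟩ | ⟨i, h1, h2, h3⟩
      · subst h1; subst h2; subst h3
        by_cases hs : 0 < g p.2
        · simp only [hs, if_true]
          exact Or.inr ⟨p.1, rfl, hs, rfl⟩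
        · simp [hs]
      · subst h1; subst h3
        by_cases hs : 0 < g p.2
        · simp only [hs, if_true]
          by_cases hb : b2 < g p.2
          · simp only [hb, if_true]
            exact Or.inr ⟨p.1, rfl, hs, rfl⟩
          · simp only [hb, if_false]
            exact Or.inr ⟨i, rfl, h2, rfl⟩
        · have hb : ¬ b2 < g p.2 := by omega
          simp only [hs, hb, if_false]
          exact Or.inr ⟨i, rfl, h2, rfl⟩

-- A's inner scan result projected to the index equals B's filtered-max? selection
theorem inner_eq (g : String → Int) (used : PySem.Set Int) (headers : List String) :
    ((PySem.List.enumerate headers 0).foldl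
      (fun (b : Option Int × Int) p =>
        if PySem.Set.contains used p.1 then b
        else
          let s := g p.2
          if b.2 < s then (some p.1, s) else b) (none, 0)).1
    = (PySem.List.max?
        ((((PySem.List.enumerate headers 0).filter
            (fun p => !(PySem.Set.contains used p.1))).map
            (fun p => (p.1, g p.2))).filter (fun c => decide (0 < c.2)))
        (fun c => c.2)).map (fun c => c.1) := by
  have h := inner_sim g used (PySem.List.enumerate headers 0) (none, 0) none (Or.inl ⟨rfl, rfl, rfl⟩)
  simp only [PySem.List.max?, List.foldl_filter, List.foldl_map]
  rw [List.foldl_ext _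
    (fun (a : Option (Int × Int)) (p : Int × String) =>
      if !(PySem.Set.contains used p.1) then
        (if 0 < g p.2 then
          (match a with
           | none => some (p.1, g p.2)
           | some m => if m.2 < g p.2 then some (p.1, g p.2) else some m)
         else a)
      else a)
    none (fun a b _ => by cases a <;> by_cases h2 : (0:Int) < g b.2 <;> simp [h2])]
  rcases h with ⟨h1, h2, h3⟩ | ⟨i, h1, h2, h3⟩
  · rw [h1, h3]; rfl
  · rw [h1, h3]; rfl

-- A's outer fold over any remaining fields, from a dict with accumulated items,
-- produces exactly the accumulated items followed by B's recursive assignment.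
theorem outer_sim (headers : List String) (field_labels : List String) :
    ∀ (fields : List String) (acc : List (String × Option Int)) (used : PySem.Set Int),
    fields.Nodup → (∀ f ∈ fields, f ∉ acc.map (fun q => q.1)) →
    ((fields.foldl
      (fun (st : PySem.Dict String (Option Int) × PySem.Set Int) field_name =>
        let label_index : Int := (PySem.Int.ofChars? (PySem.List.slice field_name.toList (some 5) none)).getD 0 - 1
        let label := if 0 ≤ label_index ∧ label_index < field_labels.length then PySem.List.pyGetD field_labels label_index field_name else field_name
        let best := (PySem.List.enumerate headers 0).foldl
          (fun (b : Option Int × Int) p =>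
            if PySem.Set.contains st.2 p.1 then b
            else
              let score := import_header_match_score field_name label p.2
              if b.2 < score then (some p.1, score) else b)
          (none, 0)
        (PySem.Dict.insert st.1 field_name best.1,
         match best.1 with
         | some i => PySem.Set.add st.2 i
         | none => st.2))
      (PySem.Dict.mk acc, used)).1).items
    = acc ++ assign_fields headers field_labels fields used := by
  intro fields
  induction fields with
  | nil => intro acc used _ _; simp [assign_fields]
  | cons f rest ih =>
    intro acc used hnd hacc
    obtain ⟨hf, hrest⟩ := List.nodup_cons.mp hnd
    have hfa : f ∉ acc.map (fun q => q.1) := hacc f List.mem_cons_self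
    have hcont : (PySem.Dict.mk acc).contains f = false := by
      simp only [PySem.Dict.contains_mk, List.any_eq_false]
      intro p hp
      simp only [beq_iff_eq]
      intro h
      exact hfa (List.mem_map.mpr ⟨p, hp, h⟩)
    simp only [List.foldl_cons, assign_fields, label_for]
    rw [inner_eq]
    cases hm : PySem.List.max? (List.filter (fun c => decide (0 < c.2))
        (List.map
          (fun p =>
            (p.1,
              import_header_match_score f
                (if 0 ≤ (PySem.Int.ofChars? (PySem.List.slice f.toList (some 5) none)).getD 0 - 1 ∧
                      (PySem.Int.ofChars? (PySem.List.slice f.toList (some 5) none)).getD 0 - 1 < (field_labels.length : Int) then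
                  PySem.List.pyGetD field_labels
                    ((PySem.Int.ofChars? (PySem.List.slice f.toList (some 5) none)).getD 0 - 1) f
                else f)
                p.2))
          (List.filter (fun p => !(PySem.Set.contains used p.1)) (PySem.List.enumerate headers 0)))) (fun c => c.2) with
    | none =>
      simp only [Option.map_none]
      rw [show ({ items := acc } : PySem.Dict String (Option Int)).insert f none
            = ({ items := acc ++ [(f, none)] } : PySem.Dict String (Option Int)) by
          simp [PySem.Dict.insert, hcont]]
      rw [show acc ++ ((f, (none : Option Int)) :: assign_fields headers field_labels rest used)
            = (acc ++ [(f, (none : Option Int))]) ++ assign_fields headers field_labels rest used by simp]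
      exact ih (acc ++ [(f, none)]) used hrest (by
        intro f' hf'
        simp only [List.map_append, List.mem_append, List.map_cons, List.map_nil, List.mem_singleton]
        rintro (h | h)
        · exact hacc f' (List.mem_cons_of_mem _ hf') h
        · exact hf (h ▸ hf'))
    | some m =>
      simp only [Option.map_some]
      rw [show ({ items := acc } : PySem.Dict String (Option Int)).insert f (some m.1)
            = ({ items := acc ++ [(f, some m.1)] } : PySem.Dict String (Option Int)) by
          simp [PySem.Dict.insert, hcont]]
      rw [show acc ++ ((f, some m.1) :: assign_fields headers field_labels rest (PySem.Set.union used [m.1]))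
            = (acc ++ [(f, some m.1)]) ++ assign_fields headers field_labels rest (PySem.Set.union used [m.1]) by simp]
      exact ih (acc ++ [(f, some m.1)]) (PySem.Set.union used [m.1]) hrest (by
        intro f' hf'
        simp only [List.map_append, List.mem_append, List.map_cons, List.map_nil, List.mem_singleton]
        rintro (h | h)
        · exact hacc f' (List.mem_cons_of_mem _ hf') h
        · exact hf (h ▸ hf'))

-- the fields of B's recursive assignment are the fields it was given
theorem fst_assign (headers : List String) (field_labels : List String) :
    ∀ (fields : List String) (used : PySem.Set Int),
    (assign_fields headers field_labels fields used).map (fun q => q.1) = fields := by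
  intro fields
  induction fields with
  | nil => intro used; simp [assign_fields]
  | cons f rest ih =>
    intro used
    simp only [assign_fields]
    split <;> simp [ih]

-- B's dict-merge of the recursion's pairs lists field6 first, then the pairs
theorem alt_items (headers : List String) (field_labels : List String) :
    guess_import_mapping_py_alt headers field_labels
    = ("field6", none) :: assign_fields headers field_labels
        ["field1", "field2", "field3", "field4", "field5", "field7"] PySem.Set.empty := by
  have hfst := fst_assign headers field_labels ["field1", "field2", "field3", "field4", "field5", "field7"] PySem.Set.empty
  have hfresh : ∀ a ∈ assign_fields headers field_labels ["field1", "field2", "field3", "field4", "field5", "field7"] PySem.Set.empty,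
      (PySem.Dict.insert PySem.Dict.empty "field6" (none : Option Int)).contains a.1 = false := by
    intro a ha
    have hmem : a.1 ∈ (assign_fields headers field_labels ["field1", "field2", "field3", "field4", "field5", "field7"] PySem.Set.empty).map (fun q => q.1) :=
      List.mem_map_of_mem ha
    rw [hfst] at hmem
    simp only [List.mem_cons, List.not_mem_nil, or_false] at hmem
    rcases hmem with h | h | h | h | h | h <;> rw [h] <;> decide
  have hnd : ((assign_fields headers field_labels ["field1", "field2", "field3", "field4", "field5", "field7"] PySem.Set.empty).map (fun q => q.1)).Nodup := by
    rw [hfst]; decide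
  unfold guess_import_mapping_py_alt
  simp only [PySem.Dict.update]
  rw [PySem.Dict.items_foldl_insert_fresh
    (assign_fields headers field_labels ["field1", "field2", "field3", "field4", "field5", "field7"] PySem.Set.empty)
    (fun p => p.1) (fun p => p.2)
    (PySem.Dict.insert PySem.Dict.empty "field6" none) hfresh hnd]
  simp only [Prod.mk.eta, List.map_id']
  rfl

theorem guess_import_mapping_eq (headers : List String) (field_labels : List String) :
    guess_import_mapping_py headers field_labels = guess_import_mapping_py_alt headers field_labels := by
  rw [alt_items]
  exact outer_sim headers field_labels ["field1", "field2", "field3", "field4", "field5", "field7"] [("field6", none)] PySem.Set.empty (by decide)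
    (by intro f hf; fin_cases hf <;> decide)

-- ===== VERDICT (by name: the statement is the Claim_ definition above) =====
theorem guess_import_mapping_py_spec : Claim_equal_guess_import_mapping_py := by
  intro headers field_labels _
  unfold Spec_guess_import_mapping_py
  exact guess_import_mapping_eq headers field_labels
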